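-- pv_equiv track=rewrite | github.com/A-J-F-Mackintosh/syngraph | scripts/simulate_synteny.py | compare_rearrangements
-- ===== SOURCE A (Python) =====
-- def compare_rearrangements(rearrangement_log, inferred_log):
-- 	simulated_rearrangements = []
-- 	inferred_rearrangements = []
-- 	for entry in rearrangement_log:
-- 		simulated_rearrangements.append(entry)
-- 	for entry in inferred_log:
-- 		if entry == ['parent', 'child', 'event', 'multiplicity', 'markers']:
-- 			pass
-- 		else:
-- 			for i in range(0, int(entry[3])):
-- 				inferred_rearrangements.append(entry[0:3])
-- 	simulated_rearrangements.sort()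
-- 	inferred_rearrangements.sort()
-- 	if simulated_rearrangements == inferred_rearrangements:
-- 		return 1
-- 	else:
-- 		return 0
-- ===== SOURCE B (Python) =====
-- def compare_rearrangements(rearrangement_log, inferred_log):
-- 	header = ['parent', 'child', 'event', 'multiplicity', 'markers']
-- 	sim_counts = {}
-- 	for entry in rearrangement_log:
-- 		key = tuple(entry)
-- 		sim_counts[key] = sim_counts.get(key, 0) + 1
-- 	inf_counts = {}
-- 	for entry in inferred_log:
-- 		if entry != header:
-- 			n = int(entry[3])
-- 			if n > 0:
-- 				key = tuple(entry[0:3])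
-- 				inf_counts[key] = inf_counts.get(key, 0) + n
-- 	return 1 if sim_counts == inf_counts else 0
-- ===== Notes on version B (the rewrite author's own statement) =====
-- stated objective: alternative
-- what changed: B builds two count dictionaries (a Counter of the simulated entries and a Counter keyed by entry[0:3] summing int(entry[3]) for non-header inferred entries) and compares them as maps, instead of A's materialising int(entry[3]) copies of each inferred entry, sorting both lists and comparing them.
import Mathlib
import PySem

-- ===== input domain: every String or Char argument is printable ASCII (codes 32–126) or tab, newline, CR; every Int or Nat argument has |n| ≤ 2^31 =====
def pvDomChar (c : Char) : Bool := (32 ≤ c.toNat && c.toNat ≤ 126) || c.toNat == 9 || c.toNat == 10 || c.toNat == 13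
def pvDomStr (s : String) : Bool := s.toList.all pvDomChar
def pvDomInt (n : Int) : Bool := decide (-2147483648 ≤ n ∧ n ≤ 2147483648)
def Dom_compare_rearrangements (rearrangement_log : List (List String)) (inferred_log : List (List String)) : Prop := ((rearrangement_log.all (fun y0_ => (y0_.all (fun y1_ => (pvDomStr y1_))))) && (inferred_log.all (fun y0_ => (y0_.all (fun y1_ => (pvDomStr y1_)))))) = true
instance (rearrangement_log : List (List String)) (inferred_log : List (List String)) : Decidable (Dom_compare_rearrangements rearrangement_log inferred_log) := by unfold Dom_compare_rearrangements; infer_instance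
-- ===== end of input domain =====

-- B replaces A's sort-both-lists-and-compare by building two count dictionaries (Counter-style)
-- and comparing them as maps, so the expansion of each inferred entry into int(entry[3]) copies
-- and the two sorts disappear (objective: alternative; no asymptotic claim).


-- the header row skipped by both versions
def pvHeader : List String := ["parent", "child", "event", "multiplicity", "markers"]

-- int(entry[3]) (0 as a don't-care default; Pre_ guarantees index 3 exists and parses)
def pvMult (e : List String) : Int := (PySem.Int.ofStr? (PySem.List.pyGetD e 3 "")).getD 0

-- ===== PORT A =====
def compare_rearrangements (rearrangement_log : List (List String)) (inferred_log : List (List String)) : Int :=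
  let simulated := rearrangement_log.foldl (fun acc e => acc ++ [e]) []
  let inferred := inferred_log.foldl (fun acc e =>
    if e = pvHeader then acc
    else (PySem.List.pyRange 0 (pvMult e)).foldl
      (fun acc2 _ => acc2 ++ [PySem.List.slice e (some 0) (some 3)]) acc) []
  let s1 := @PySem.List.sorted _ _ List.instLinearOrder.toLT LinearOrder.toDecidableLT simulated (fun x => x) false
  let s2 := @PySem.List.sorted _ _ List.instLinearOrder.toLT LinearOrder.toDecidableLT inferred (fun x => x) false
  if s1 = s2 then 1 else 0

-- ===== PORT B =====
-- Python dict equality (== ignores insertion order): compare lookups both ways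
def pvDictEq (d1 d2 : PySem.Dict (List String) Int) : Bool :=
  d1.keys.all (fun k => d2.get? k == d1.get? k) && d2.keys.all (fun k => d1.get? k == d2.get? k)

def compare_rearrangements_alt (rearrangement_log : List (List String)) (inferred_log : List (List String)) : Int :=
  let sim_counts := rearrangement_log.foldl
    (fun d e => d.insert e (d.getD e 0 + 1)) PySem.Dict.empty
  let inf_counts := inferred_log.foldl (fun d e =>
    if e = pvHeader then d
    else
      let n := pvMult e
      if 0 < n then
        let k := PySem.List.slice e (some 0) (some 3)
        d.insert k (d.getD k 0 + n)
      else d) PySem.Dict.empty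
  if pvDictEq sim_counts inf_counts then 1 else 0

-- ===== PRECONDITION & SPEC =====
-- Pre_ excludes exactly the inputs where A raises: a non-header inferred entry with no
-- index 3 (IndexError) or whose 4th field int() cannot parse (ValueError).
def Pre_compare_rearrangements (rearrangement_log : List (List String)) (inferred_log : List (List String)) : Prop :=
  ∀ e ∈ inferred_log, e ≠ pvHeader →
    4 ≤ e.length ∧ (PySem.Int.ofStr? (PySem.List.pyGetD e 3 "")).isSome = true
instance (rearrangement_log : List (List String)) (inferred_log : List (List String)) : Decidable (Pre_compare_rearrangements rearrangement_log inferred_log) := by unfold Pre_compare_rearrangements; infer_instance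

def pvWitness_compare_rearrangements : List (List String) × List (List String) :=
  ([["x", "y", "fission"]], [["x", "y", "fission", "1"]])

def Spec_compare_rearrangements (rearrangement_log : List (List String)) (inferred_log : List (List String)) (out : Int) : Prop := out = compare_rearrangements_alt rearrangement_log inferred_log
instance (rearrangement_log : List (List String)) (inferred_log : List (List String)) (out : Int) : Decidable (Spec_compare_rearrangements rearrangement_log inferred_log out) := by unfold Spec_compare_rearrangements; infer_instance

-- ===== CLAIM (what is proved, stated in full; the proofs are below) =====
def Claim_equal_compare_rearrangements : Prop := ∀ (rearrangement_log : List (List String)) (inferred_log : List (List String)), Dom_compare_rearrangements rearrangement_log inferred_log → Pre_compare_rearrangements rearrangement_log inferred_log → Spec_compare_rearrangements rearrangement_log inferred_log (compare_rearrangements rearrangement_log inferred_log)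

-- ===== LEMMAS AND PROOFS =====

-- multiset view of A's inferred list: each non-header entry contributes int(entry[3]) copies of entry[0:3]
def pvExpand (e : List String) : List (List String) :=
  if e = pvHeader then []
  else List.replicate (pvMult e).toNat (PySem.List.slice e (some 0) (some 3))

lemma pvA_inferred (il : List (List String)) (acc : List (List String)) :
    il.foldl (fun acc e =>
      if e = pvHeader then acc
      else (PySem.List.pyRange 0 (pvMult e)).foldl
        (fun acc2 _ => acc2 ++ [PySem.List.slice e (some 0) (some 3)]) acc) acc
    = acc ++ il.flatMap pvExpand := by
  rw [← PySem.List.foldl_append_eq_flatMap]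
  apply PySem.List.foldl_congr_mem
  intro a e _
  by_cases h : e = pvHeader
  · simp [pvExpand, h]
  · rw [if_neg h]
    rw [PySem.List.foldl_append_singleton_eq_map]
    simp [pvExpand, h, List.map_const', PySem.List.length_pyRange_one]

lemma pvCount_expand (e k : List String) :
    (pvExpand e).count k =
      if e ≠ pvHeader ∧ PySem.List.slice e (some 0) (some 3) = k
      then (pvMult e).toNat else 0 := by
  unfold pvExpand
  by_cases h : e = pvHeader
  · simp [h]
  · rw [if_neg h, List.count_replicate]
    by_cases hk : PySem.List.slice e (some 0) (some 3) = k
    · rw [if_pos (by simp [hk]), if_pos ⟨h, hk⟩]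
    · rw [if_neg (by simpa using hk), if_neg (fun hc => hk hc.2)]

-- B's inferred-counter step
def pvStepB (d : PySem.Dict (List String) Int) (e : List String) : PySem.Dict (List String) Int :=
  if e = pvHeader then d
  else
    let n := pvMult e
    if 0 < n then
      let k := PySem.List.slice e (some 0) (some 3)
      d.insert k (d.getD k 0 + n)
    else d

lemma pvInf_getD (il : List (List String)) (d : PySem.Dict (List String) Int) (k : List String) :
    (il.foldl pvStepB d).getD k 0 = d.getD k 0 + ((il.flatMap pvExpand).count k : Int) := by
  induction il generalizing d with
  | nil => simp
  | cons e t ih =>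
    simp only [List.foldl_cons, List.flatMap_cons, List.count_append, ih]
    have hstep : (pvStepB d e).getD k 0 = d.getD k 0 + ((pvExpand e).count k : Int) := by
      unfold pvStepB
      rw [pvCount_expand]
      by_cases h : e = pvHeader
      · simp [h]
      · rw [if_neg h]
        by_cases hn : 0 < pvMult e
        · rw [if_pos hn]
          by_cases hk : PySem.List.slice e (some 0) (some 3) = k
          · rw [PySem.Dict.getD_insert, if_pos hk.symm, if_pos ⟨h, hk⟩, hk]
            rw [Int.toNat_of_nonneg (le_of_lt hn)]
          · rw [PySem.Dict.getD_insert, if_neg (fun hkk => hk hkk.symm),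
              if_neg (fun hc => hk hc.2)]
            simp
        · rw [if_neg hn]
          have : (pvMult e).toNat = 0 := Int.toNat_of_nonpos (le_of_not_gt hn)
          simp [this]
    rw [hstep]; push_cast; ring

-- all values stored by B's inferred loop are positive
lemma pvInf_pos (il : List (List String)) (d : PySem.Dict (List String) Int)
    (hd : ∀ k v, d.get? k = some v → 0 < v) :
    ∀ k v, (il.foldl pvStepB d).get? k = some v → 0 < v := by
  induction il generalizing d with
  | nil => exact hd
  | cons e t ih =>
    simp only [List.foldl_cons]
    apply ih
    intro k v hv
    unfold pvStepB at hv
    by_cases h : e = pvHeader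
    · rw [if_pos h] at hv; exact hd k v hv
    · rw [if_neg h] at hv
      by_cases hn : 0 < pvMult e
      · simp only [if_pos hn] at hv
        rw [PySem.Dict.get?_insert] at hv
        by_cases hk : k = PySem.List.slice e (some 0) (some 3)
        · rw [if_pos hk] at hv
          have hv' := Option.some_injective _ hv
          have hge : 0 ≤ d.getD (PySem.List.slice e (some 0) (some 3)) 0 := by
            rw [PySem.Dict.getD_eq_get?_getD]
            cases hg : d.get? (PySem.List.slice e (some 0) (some 3)) with
            | none => simp
            | some w => simpa using le_of_lt (hd _ w hg)
          omega
        · rw [if_neg hk] at hv; exact hd k v hv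
      · rw [if_neg hn] at hv; exact hd k v hv

-- all values stored by B's simulated counter are positive
lemma pvSim_pos (rl : List (List String)) :
    ∀ k v, (PySem.Dict.counter rl).get? k = some v → 0 < v := by
  intro k v hv
  have hm := PySem.Dict.mem_items_of_get?_eq_some _ hv
  rw [PySem.Dict.items_counter] at hm
  rcases List.mem_map.1 hm with ⟨k', hk', heq⟩
  have hmem : k' ∈ rl := by simpa [PySem.Set.mem_ofList] using hk'
  have hvv : ((rl.count k' : Int)) = v := congrArg Prod.snd heq
  rw [← hvv]
  exact_mod_cast List.count_pos_iff.2 hmem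

-- pvDictEq is lookup equality
lemma pvDictEq_iff (d1 d2 : PySem.Dict (List String) Int) :
    pvDictEq d1 d2 = true ↔ ∀ k, d1.get? k = d2.get? k := by
  unfold pvDictEq
  rw [Bool.and_eq_true, List.all_eq_true, List.all_eq_true]
  constructor
  · rintro ⟨h1, h2⟩ k
    by_cases hk1 : k ∈ d1.keys
    · exact (beq_iff_eq.1 (h1 k hk1)).symm
    by_cases hk2 : k ∈ d2.keys
    · exact beq_iff_eq.1 (h2 k hk2)
    · rw [(PySem.Dict.get?_eq_none_iff_not_mem_keys d1 k).2 hk1,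
        (PySem.Dict.get?_eq_none_iff_not_mem_keys d2 k).2 hk2]
  · intro h
    exact ⟨fun k _ => beq_iff_eq.2 (h k).symm, fun k _ => beq_iff_eq.2 (h k)⟩

-- under positivity, lookup equality is getD-at-0 equality
lemma pvGet?_eq_of_getD (d1 d2 : PySem.Dict (List String) Int)
    (h1 : ∀ k v, d1.get? k = some v → 0 < v) (h2 : ∀ k v, d2.get? k = some v → 0 < v)
    (h : ∀ k, d1.getD k 0 = d2.getD k 0) : ∀ k, d1.get? k = d2.get? k := by
  intro k
  have hk := h k
  rw [PySem.Dict.getD_eq_get?_getD, PySem.Dict.getD_eq_get?_getD] at hk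
  cases hg1 : d1.get? k with
  | none =>
    cases hg2 : d2.get? k with
    | none => rfl
    | some v2 =>
      rw [hg1, hg2] at hk
      have := h2 k v2 hg2
      simp at hk; omega
  | some v1 =>
    cases hg2 : d2.get? k with
    | none =>
      rw [hg1, hg2] at hk
      have := h1 k v1 hg1
      simp at hk; omega
    | some v2 =>
      rw [hg1, hg2] at hk
      simp at hk; simp [hk]

-- ===== VERDICT (by name: the statement is the Claim_ definition above) =====
theorem compare_rearrangements_spec : Claim_equal_compare_rearrangements := by
  intro rl il _ _
  unfold Spec_compare_rearrangements compare_rearrangements compare_rearrangements_alt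
  simp only []
  rw [PySem.List.foldl_append_singleton_eq_self, List.nil_append]
  rw [pvA_inferred, List.nil_append]
  rw [PySem.Dict.foldl_insert_getD_add_one_eq_counter]
  have hfold : (il.foldl (fun d e =>
      if e = pvHeader then d
      else
        let n := pvMult e
        if 0 < n then
          let k := PySem.List.slice e (some 0) (some 3)
          d.insert k (d.getD k 0 + n)
        else d) PySem.Dict.empty) = il.foldl pvStepB PySem.Dict.empty := rfl
  rw [hfold]
  have hempty : ∀ (k : List String) (v : Int), (PySem.Dict.empty : PySem.Dict (List String) Int).get? k = some v → 0 < v := by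
    intro k v hv; rw [PySem.Dict.get?_empty] at hv; cases hv
  have hinfpos := pvInf_pos il PySem.Dict.empty hempty
  have hsimpos := pvSim_pos rl
  apply if_congr _ rfl rfl
  rw [PySem.List.sorted_id_eq_sorted_id_iff_perm, List.perm_iff_count, pvDictEq_iff]
  constructor
  · intro h
    apply pvGet?_eq_of_getD _ _ hsimpos hinfpos
    intro k
    rw [PySem.Dict.getD_counter, pvInf_getD, PySem.Dict.getD_empty, zero_add]
    exact_mod_cast h k
  · intro h k
    have := congrArg (fun o => o.getD (0 : Int)) (h k)
    simp only [] at this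
    rw [← PySem.Dict.getD_eq_get?_getD, ← PySem.Dict.getD_eq_get?_getD,
      PySem.Dict.getD_counter, pvInf_getD, PySem.Dict.getD_empty, zero_add] at this
    exact_mod_cast this
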